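-- pv_equiv track=rewrite | github.com/tanmoyjana/utility_tester | submission/diptayan/py1-AdditionGame.py | getMaximumPoints
-- ===== SOURCE A (Python) =====
-- def getMaximumPoints ( A , B , C , N ):
--     result = 0
--     while N > 0 :
--         if ( A + B + C ) > 0 :
--             if max ( A , B , C ) == A :
--                 result = result + A
--                 A = A - 1
--             elif max( A , B , C ) == B :
--                 result = result + B
--                 B = B - 1
--             elif max( A , B , C ) == C :
--                 result = result + C
--                 C = C - 1
--         N = N - 1
--     return result
-- ===== SOURCE B (Python) =====
-- def getMaximumPoints(A, B, C, N):
--     # Closed form: t = number of greedy steps; sum the t largest values of the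
--     # three decreasing runs A,A-1,..., B,..., C,... via triangular numbers.
--     S = A + B + C
--     t = min(max(N, 0), max(S, 0))
--     h = max(A, B, C)
--     l = min(A, B, C)
--     m = S - h - l
--     def tr(n):
--         return n * (n + 1) // 2
--     if t <= h - m:
--         return tr(h) - tr(h - t)
--     t2 = t - (h - m)
--     if t2 <= 2 * (m - l):
--         q, r = divmod(t2, 2)
--         return (tr(h) - tr(m)) + 2 * (tr(m) - tr(m - q)) + r * (m - q)
--     t3 = t2 - 2 * (m - l)
--     q, r = divmod(t3, 3)
--     return (tr(h) - tr(m)) + 2 * (tr(m) - tr(l)) + 3 * (tr(l) - tr(l - q)) + r * (l - q)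
-- ===== Notes on version B (the rewrite author's own statement) =====
-- stated objective: faster
-- what changed: A's greedy loop (decrement the max of A,B,C once per point, N iterations) is replaced by a closed form: the number of taken steps is min(max(N,0),max(A+B+C,0)) and the sum of the taken values is computed directly with triangular-number formulas over the three decreasing runs, in O(1).
import Mathlib
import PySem

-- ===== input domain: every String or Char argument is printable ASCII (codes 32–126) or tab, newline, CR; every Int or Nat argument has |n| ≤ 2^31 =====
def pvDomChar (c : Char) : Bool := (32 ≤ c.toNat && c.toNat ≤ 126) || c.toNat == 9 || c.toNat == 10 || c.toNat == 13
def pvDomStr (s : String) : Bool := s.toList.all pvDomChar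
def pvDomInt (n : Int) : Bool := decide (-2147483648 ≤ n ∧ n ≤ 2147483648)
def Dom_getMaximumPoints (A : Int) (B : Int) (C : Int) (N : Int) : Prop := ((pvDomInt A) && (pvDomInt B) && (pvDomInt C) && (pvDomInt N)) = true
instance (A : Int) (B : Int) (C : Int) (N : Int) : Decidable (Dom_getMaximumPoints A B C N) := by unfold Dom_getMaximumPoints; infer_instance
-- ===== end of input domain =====

-- B replaces A's step-by-step greedy loop (O(N) iterations) by a closed form:
-- the number of taken steps and the sum of the taken values are computed with
-- triangular numbers over the three decreasing runs (objective: faster, O(1)).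

-- ===== PORT A =====
-- A's while loop: fuel = max(N,0) iterations over the mutable state (A,B,C,result).
def pvALoop : Nat → Int → Int → Int → Int → Int
  | 0, _, _, _, r => r
  | n+1, a, b, c, r =>
    if a + b + c > 0 then
      if max a (max b c) = a then
        pvALoop n (a-1) b c (r + a)
      else if max a (max b c) = b then
        pvALoop n a (b-1) c (r + b)
      else if max a (max b c) = c then
        pvALoop n a b (c-1) (r + c)
      else
        pvALoop n a b c r
    else
      pvALoop n a b c r

def getMaximumPoints (A : Int) (B : Int) (C : Int) (N : Int) : Int :=
  pvALoop N.toNat A B C 0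

-- ===== PORT B =====
-- tr(n) = n*(n+1)//2
def pvTr (n : Int) : Int := PySem.Int.floordiv (n * (n + 1)) 2

def getMaximumPoints_alt (A : Int) (B : Int) (C : Int) (N : Int) : Int :=
  let S := A + B + C
  let t := min (max N 0) (max S 0)
  let h := max A (max B C)
  let l := min A (min B C)
  let m := S - h - l
  if t ≤ h - m then pvTr h - pvTr (h - t)
  else
    let t2 := t - (h - m)
    if t2 ≤ 2 * (m - l) then
      let q := PySem.Int.floordiv t2 2
      let r := PySem.Int.mod t2 2
      (pvTr h - pvTr m) + 2 * (pvTr m - pvTr (m - q)) + r * (m - q)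
    else
      let t3 := t2 - 2 * (m - l)
      let q := PySem.Int.floordiv t3 3
      let r := PySem.Int.mod t3 3
      (pvTr h - pvTr m) + 2 * (pvTr m - pvTr l) + 3 * (pvTr l - pvTr (l - q)) + r * (l - q)

-- ===== PRECONDITION & SPEC =====
def Spec_getMaximumPoints (A : Int) (B : Int) (C : Int) (N : Int) (out : Int) : Prop := out = getMaximumPoints_alt A B C N
instance (A : Int) (B : Int) (C : Int) (N : Int) (out : Int) : Decidable (Spec_getMaximumPoints A B C N out) := by unfold Spec_getMaximumPoints; infer_instance

-- ===== CLAIM (what is proved, stated in full; the proofs are below) =====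
def Claim_equal_getMaximumPoints : Prop := ∀ (A : Int) (B : Int) (C : Int) (N : Int), Dom_getMaximumPoints A B C N → Spec_getMaximumPoints A B C N (getMaximumPoints A B C N)

-- ===== LEMMAS AND PROOFS =====

-- Sorted-input closed form (h ≥ m ≥ l): the core of B, with the lets inlined.
def pvCFs (h m l t : Int) : Int :=
  if t ≤ h - m then pvTr h - pvTr (h - t)
  else if t - (h - m) ≤ 2 * (m - l) then
    (pvTr h - pvTr m) + 2 * (pvTr m - pvTr (m - PySem.Int.floordiv (t - (h - m)) 2))
      + PySem.Int.mod (t - (h - m)) 2 * (m - PySem.Int.floordiv (t - (h - m)) 2)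
  else
    (pvTr h - pvTr m) + 2 * (pvTr m - pvTr l)
      + 3 * (pvTr l - pvTr (l - PySem.Int.floordiv (t - (h - m) - 2 * (m - l)) 3))
      + PySem.Int.mod (t - (h - m) - 2 * (m - l)) 3
        * (l - PySem.Int.floordiv (t - (h - m) - 2 * (m - l)) 3)

def pvCF (a b c t : Int) : Int :=
  pvCFs (max a (max b c)) (a + b + c - max a (max b c) - min a (min b c)) (min a (min b c)) t

theorem pvAlt_eq_CF (A B C N : Int) :
    getMaximumPoints_alt A B C N = pvCF A B C (min (max N 0) (max (A + B + C) 0)) := rfl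

theorem pvTr_succ (n : Int) : pvTr n = n + pvTr (n - 1) := by
  unfold pvTr
  rw [PySem.Int.floordiv_eq_ediv_of_pos (by norm_num), PySem.Int.floordiv_eq_ediv_of_pos (by norm_num)]
  obtain ⟨k, hk⟩ := Int.even_mul_succ_self (n-1)
  have h1 : n * (n + 1) = 2*k + 2*n := by linear_combination hk
  have h2 : (n - 1) * (n - 1 + 1) = 2*k := by linear_combination hk
  rw [h1, h2]
  omega

theorem pvCF_swap12 (a b c t : Int) : pvCF a b c t = pvCF b a c t := by
  unfold pvCF
  rw [max_left_comm a b c, min_left_comm a b c, show a+b+c = b+a+c from by ring]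

theorem pvCF_swap23 (a b c t : Int) : pvCF a b c t = pvCF a c b t := by
  unfold pvCF
  rw [max_comm b c, min_comm b c, show a+b+c = a+c+b from by ring]

theorem pvCF_of_sorted (h m l t : Int) (hml : l ≤ m) (hhm : m ≤ h) :
    pvCF h m l t = pvCFs h m l t := by
  unfold pvCF
  rw [max_eq_left hml, max_eq_left hhm, min_eq_right hml, min_eq_right (le_trans hml hhm),
    show h + m + l - h - l = m from by ring]

theorem pvCF_zero (a b c : Int) : pvCF a b c 0 = 0 := by
  unfold pvCF pvCFs
  rw [if_pos (by omega)]
  simp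

-- step lemma, case h-1 ≥ m (holds for all h m l t: the branch conditions align)
theorem pvStepA (h m l t : Int) :
    pvCFs h m l t = h + pvCFs (h-1) m l (t-1) := by
  unfold pvCFs
  rw [show t - 1 - (h - 1 - m) = t - (h - m) from by ring,
      show h - 1 - (t - 1) = h - t from by ring]
  split_ifs <;> first | omega | linarith [pvTr_succ h]

-- step lemma, case h = m > l
theorem pvStepB (h l t : Int) (hl : l ≤ h - 1) (ht : 1 ≤ t) :
    pvCFs h h l t = h + pvCFs h (h-1) l (t-1) := by
  unfold pvCFs
  simp only [PySem.Int.floordiv_eq_ediv_of_pos (b := 2) (by norm_num),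
    PySem.Int.mod_eq_emod_of_pos (b := 2) (by norm_num),
    PySem.Int.floordiv_eq_ediv_of_pos (b := 3) (by norm_num),
    PySem.Int.mod_eq_emod_of_pos (b := 3) (by norm_num)]
  rcases (by omega : t = 1 ∨ t = 2 ∨ 3 ≤ t) with rfl | rfl | ht3
  · split_ifs <;> first | omega | (ring_nf; norm_num)
  · split_ifs <;> first | omega |
      (have hs := pvTr_succ h; norm_num; ring_nf; ring_nf at hs; linarith [hs])
  · have e1 : t - (h - h) = t := by ring
    have e2 : t - 1 - (h - (h - 1)) = t - 2 := by ring
    rw [e1, e2]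
    have e3 : (t-2)/2 = t/2 - 1 := by omega
    have e4 : (t-2)%2 = t%2 := by omega
    rw [e3, e4]
    have e5 : t - 2 - 2*((h-1) - l) = t - 2*(h - l) := by ring
    rw [e5]
    have e6 : h - 1 - (t/2 - 1) = h - t/2 := by ring
    rw [e6]
    split_ifs <;> first | omega | linarith [pvTr_succ h]

-- step lemma, case h = m = l
theorem pvStepC (h t : Int) (ht : 1 ≤ t) :
    pvCFs h h h t = h + pvCFs h h (h-1) (t-1) := by
  unfold pvCFs
  simp only [PySem.Int.floordiv_eq_ediv_of_pos (b := 2) (by norm_num),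
    PySem.Int.mod_eq_emod_of_pos (b := 2) (by norm_num),
    PySem.Int.floordiv_eq_ediv_of_pos (b := 3) (by norm_num),
    PySem.Int.mod_eq_emod_of_pos (b := 3) (by norm_num)]
  rcases (by omega : t = 1 ∨ t = 2 ∨ t = 3 ∨ 4 ≤ t) with rfl | rfl | rfl | ht4
  · split_ifs <;> first | omega | norm_num
  · split_ifs <;> first | omega | (norm_num; ring)
  · split_ifs <;> first | omega |
      (have hs := pvTr_succ h; norm_num; ring_nf; ring_nf at hs; linarith [hs])
  · have e1 : t - (h - h) - 2 * (h - h) = t := by ring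
    have e2 : t - 1 - (h - h) - 2 * (h - (h - 1)) = t - 3 := by ring
    rw [e1, e2]
    have e3 : (t-3)/3 = t/3 - 1 := by omega
    have e4 : (t-3)%3 = t%3 := by omega
    rw [e3, e4]
    have e5 : h - 1 - (t/3 - 1) = h - t/3 := by ring
    rw [e5]
    split_ifs <;> first | omega | linarith [pvTr_succ h]

theorem pvCrux_sorted (h m l t : Int) (hml : l ≤ m) (hhm : m ≤ h) (ht : 1 ≤ t) :
    pvCFs h m l t = h + pvCF (h-1) m l (t-1) := by
  rcases (by omega : m ≤ h - 1 ∨ h - 1 < m) with hc | hc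
  · rw [pvStepA h m l t, pvCF_of_sorted (h-1) m l (t-1) hml hc]
  · have hm : m = h := by omega
    subst hm
    rcases (by omega : l ≤ m - 1 ∨ m - 1 < l) with hd | hd
    · rw [pvStepB m l t hd ht, pvCF_swap12, pvCF_of_sorted m (m-1) l (t-1) (by omega) (by omega)]
    · have hl : l = m := by omega
      subst hl
      rw [pvStepC l t ht, pvCF_swap12, pvCF_swap23,
        pvCF_of_sorted l l (l-1) (t-1) (by omega) (by omega)]

theorem pvCrux_a (a b c t : Int) (h1 : b ≤ a) (h2 : c ≤ a) (ht : 1 ≤ t) :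
    pvCF a b c t = a + pvCF (a-1) b c (t-1) := by
  rcases le_total c b with hcb | hbc
  · rw [pvCF_of_sorted a b c t hcb h1]
    exact pvCrux_sorted a b c t hcb h1 ht
  · rw [pvCF_swap23, pvCF_of_sorted a c b t hbc h2]
    rw [pvCrux_sorted a c b t hbc h2 ht, pvCF_swap23]

theorem pvCrux_b (a b c t : Int) (hna : ¬(b ≤ a ∧ c ≤ a)) (hcb : c ≤ b) (ht : 1 ≤ t) :
    pvCF a b c t = b + pvCF a (b-1) c (t-1) := by
  have hab : a < b := by
    rcases not_and_or.mp hna with h | h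
    · omega
    · omega
  rcases le_total c a with hca | hac
  · rw [pvCF_swap12, pvCF_of_sorted b a c t hca (by omega)]
    rw [pvCrux_sorted b a c t hca (by omega) ht, pvCF_swap12]
  · -- a ≤ c ≤ b : pvCF a b c = pvCF b c a
    rw [pvCF_swap12, pvCF_swap23, pvCF_of_sorted b c a t hac hcb]
    rw [pvCrux_sorted b c a t hac hcb ht, pvCF_swap23, pvCF_swap12]

theorem pvCrux_c (a b c t : Int) (hna : ¬(b ≤ a ∧ c ≤ a)) (hbc : ¬(c ≤ b)) (ht : 1 ≤ t) :
    pvCF a b c t = c + pvCF a b (c-1) (t-1) := by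
  have hcb : b < c := by omega
  have hac : a < c := by
    rcases not_and_or.mp hna with h | h
    · omega
    · omega
  rcases le_total b a with hba | hab
  · -- c > a ≥ b : pvCF a b c = pvCF c a b
    rw [pvCF_swap23, pvCF_swap12, pvCF_of_sorted c a b t hba (by omega)]
    rw [pvCrux_sorted c a b t hba (by omega) ht, pvCF_swap12, pvCF_swap23]
  · -- c > b ≥ a : pvCF a b c = pvCF c b a
    rw [pvCF_swap12, pvCF_swap23, pvCF_swap12,
      pvCF_of_sorted c b a t hab (by omega)]
    rw [pvCrux_sorted c b a t hab (by omega) ht, pvCF_swap12, pvCF_swap23, pvCF_swap12]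

theorem pvALoop_eq (n : Nat) : ∀ (a b c r : Int),
    pvALoop n a b c r = r + pvCF a b c (min (n : Int) (max (a + b + c) 0)) := by
  induction n with
  | zero =>
    intro a b c r
    have e : min ((0:Nat) : Int) (max (a + b + c) 0) = 0 := by omega
    rw [e, pvCF_zero]
    simp [pvALoop]
  | succ n ih =>
    intro a b c r
    by_cases hS : a + b + c > 0
    · by_cases hA : max a (max b c) = a
      · simp only [pvALoop, if_pos hS, if_pos hA]
        rw [ih (a-1) b c (r+a)]
        rw [pvCrux_a a b c (min ((n+1 : Nat) : Int) (max (a + b + c) 0))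
          (by omega) (by omega) (by omega)]
        have e : min ((n : Nat) : Int) (max (a - 1 + b + c) 0)
            = min ((n+1 : Nat) : Int) (max (a + b + c) 0) - 1 := by omega
        rw [e]
        ring
      · by_cases hB : max a (max b c) = b
        · simp only [pvALoop, if_pos hS, if_neg hA, if_pos hB]
          rw [ih a (b-1) c (r+b)]
          rw [pvCrux_b a b c (min ((n+1 : Nat) : Int) (max (a + b + c) 0))
            (by omega) (by omega) (by omega)]
          have e : min ((n : Nat) : Int) (max (a + (b - 1) + c) 0)
              = min ((n+1 : Nat) : Int) (max (a + b + c) 0) - 1 := by omega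
          rw [e]
          ring
        · by_cases hC : max a (max b c) = c
          · simp only [pvALoop, if_pos hS, if_neg hA, if_neg hB, if_pos hC]
            rw [ih a b (c-1) (r+c)]
            rw [pvCrux_c a b c (min ((n+1 : Nat) : Int) (max (a + b + c) 0))
              (by omega) (by omega) (by omega)]
            have e : min ((n : Nat) : Int) (max (a + b + (c - 1)) 0)
                = min ((n+1 : Nat) : Int) (max (a + b + c) 0) - 1 := by omega
            rw [e]
            ring
          · exact absurd rfl (by omega : ¬ (max a (max b c) = max a (max b c)))
    · simp only [pvALoop, if_neg hS]
      rw [ih a b c r]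
      have e : min ((n : Nat) : Int) (max (a + b + c) 0)
          = min ((n+1 : Nat) : Int) (max (a + b + c) 0) := by omega
      rw [e]

-- ===== VERDICT (by name: the statement is the Claim_ definition above) =====
theorem getMaximumPoints_spec : Claim_equal_getMaximumPoints := by
  intro A B C N _
  unfold Spec_getMaximumPoints
  rw [pvAlt_eq_CF, getMaximumPoints, pvALoop_eq]
  rw [Int.ofNat_toNat]
  ring
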